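-- pv_equiv track=rewrite | github.com/bosssoupha/project.software | project ceit software/aiy to/5.py | sum_odd_fibonacci_within_limit
-- ===== SOURCE A (Python) =====
-- def fibonacci(n, memo={}):
--     if n <= 0:
--         return 0
--     elif n == 1:
--         return 1
--     elif n in memo:
--         return memo[n]
--     else:
--         memo[n] = fibonacci(n-1) + fibonacci(n-2)
--         return memo[n]
--
-- def sum_odd_fibonacci_within_limit(limit):
--     sum_odd = 0
--     i = 0
--     while True:
--         fib_num = fibonacci(i)
--         if fib_num > limit:
--             break
--         if fib_num % 2 != 0:
--             sum_odd += fib_num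
--         i += 1
--     return sum_odd
-- ===== SOURCE B (Python) =====
-- def sum_odd_fibonacci_within_limit(limit):
--     sum_odd = 0
--     a, b = 0, 1
--     while a <= limit:
--         if a % 2 != 0:
--             sum_odd += a
--         a, b = b, a + b
--     return sum_odd
-- ===== Notes on version B (the rewrite author's own statement) =====
-- stated objective: simpler
-- what changed: Replaced the indexed memoized recursive fibonacci helper and the while-True/break loop over indices by a single rolling-pair loop (a, b = b, a+b) with the bound as the loop condition.
import Mathlib
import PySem

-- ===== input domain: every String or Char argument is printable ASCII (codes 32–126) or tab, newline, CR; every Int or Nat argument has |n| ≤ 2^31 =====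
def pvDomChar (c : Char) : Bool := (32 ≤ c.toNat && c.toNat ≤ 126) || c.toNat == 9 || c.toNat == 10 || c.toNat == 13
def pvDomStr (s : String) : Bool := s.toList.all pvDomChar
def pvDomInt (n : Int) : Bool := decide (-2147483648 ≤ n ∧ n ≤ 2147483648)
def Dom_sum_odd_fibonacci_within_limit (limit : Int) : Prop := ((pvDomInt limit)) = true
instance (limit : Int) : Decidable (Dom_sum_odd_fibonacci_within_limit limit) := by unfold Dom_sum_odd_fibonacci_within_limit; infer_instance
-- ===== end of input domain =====

-- B replaces A's indexed memoized fibonacci helper and while-True/break loop by one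
-- rolling-pair loop (a, b = b, a+b); objective: simpler.
-- Both loops are given fuel 100 to make them total in Lean: on Dom (|limit| ≤ 2^31)
-- at most 48 iterations ever run (fib 47 > 2^31), so the fuel is never exhausted there;
-- the equivalence proof holds for every fuel and does not depend on this bound.

-- ===== PORT A =====
-- fibonacci(n, memo): the Python default-arg dict is shared across calls, so the
-- memo is threaded explicitly: the function returns (value, updated memo).
def fib_memo (n : Int) (memo : PySem.Dict Int Int) : Int × PySem.Dict Int Int :=
  if n ≤ 0 then (0, memo)
  else if n = 1 then (1, memo)
  else
    match memo.get? n with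
    | some v => (v, memo)
    | none =>
      let p1 := fib_memo (n - 1) memo
      let p2 := fib_memo (n - 2) p1.2
      let v := p1.1 + p2.1
      (v, p2.2.insert n v)
termination_by n.toNat
decreasing_by all_goals omega

-- the while-True loop of A, with fuel
def sum_odd_loop (limit sum_odd i : Int) (memo : PySem.Dict Int Int) : Nat → Int
  | 0 => sum_odd
  | fuel + 1 =>
    let p := fib_memo i memo
    if p.1 > limit then sum_odd
    else sum_odd_loop limit (if p.1 % 2 ≠ 0 then sum_odd + p.1 else sum_odd) (i + 1) p.2 fuel

def sum_odd_fibonacci_within_limit (limit : Int) : Int :=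
  sum_odd_loop limit 0 0 PySem.Dict.empty 100

-- ===== PORT B =====
def sum_odd_loop_alt (limit sum_odd a b : Int) : Nat → Int
  | 0 => sum_odd
  | fuel + 1 =>
    if a ≤ limit then
      sum_odd_loop_alt limit (if a % 2 ≠ 0 then sum_odd + a else sum_odd) b (a + b) fuel
    else sum_odd

def sum_odd_fibonacci_within_limit_alt (limit : Int) : Int :=
  sum_odd_loop_alt limit 0 0 1 100

-- ===== PRECONDITION & SPEC =====
def Spec_sum_odd_fibonacci_within_limit (limit : Int) (out : Int) : Prop := out = sum_odd_fibonacci_within_limit_alt limit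
instance (limit : Int) (out : Int) : Decidable (Spec_sum_odd_fibonacci_within_limit limit out) := by unfold Spec_sum_odd_fibonacci_within_limit; infer_instance

-- ===== CLAIM (what is proved, stated in full; the proofs are below) =====
def Claim_equal_sum_odd_fibonacci_within_limit : Prop := ∀ (limit : Int), Dom_sum_odd_fibonacci_within_limit limit → Spec_sum_odd_fibonacci_within_limit limit (sum_odd_fibonacci_within_limit limit)

-- ===== LEMMAS AND PROOFS =====

-- pure (unmemoized) fibonacci, the reference value for both ports
def fibP (n : Int) : Int :=
  if n ≤ 0 then 0
  else if n = 1 then 1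
  else fibP (n - 1) + fibP (n - 2)
termination_by n.toNat
decreasing_by all_goals omega

-- a memo is good when every stored value is the true fibonacci value
def GoodMemo (memo : PySem.Dict Int Int) : Prop :=
  ∀ k v, memo.get? k = some v → v = fibP k

theorem fib_memo_spec (n : Int) (memo : PySem.Dict Int Int) (h : GoodMemo memo) :
    (fib_memo n memo).1 = fibP n ∧ GoodMemo (fib_memo n memo).2 := by
  by_cases h0 : n ≤ 0
  · rw [fib_memo, fibP]; simp [h0, h]
  · by_cases h1 : n = 1
    · rw [fib_memo, fibP]; simp [h1, h]
    · rw [fib_memo]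
      simp only [h0, h1, if_false]
      cases hm : memo.get? n with
      | some v => exact ⟨h n v hm, h⟩
      | none =>
        have ih1 := fib_memo_spec (n - 1) memo h
        have ih2 := fib_memo_spec (n - 2) (fib_memo (n - 1) memo).2 ih1.2
        refine ⟨?_, ?_⟩
        · simp only [ih1.1, ih2.1]
          conv_rhs => rw [fibP]
          simp [h0, h1]
        · intro k v hk
          rw [PySem.Dict.get?_insert] at hk
          split at hk
          · next heq =>
            injection hk with hv
            subst heq; rw [← hv, ih1.1, ih2.1]
            conv_rhs => rw [fibP]; simp [h0, h1]
          · exact ih2.2 k v hk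
termination_by n.toNat
decreasing_by all_goals omega

theorem fibP_rec (i : Int) (hi : 0 ≤ i) : fibP (i + 2) = fibP (i + 1) + fibP i := by
  rw [fibP]
  have h0 : ¬ i + 2 ≤ 0 := by omega
  have h1 : i + 2 ≠ 1 := by omega
  simp only [h0, h1, if_false]
  congr 1 <;> congr 1 <;> omega

theorem loop_eq (limit : Int) (fuel : Nat) :
    ∀ (s i : Int) (memo : PySem.Dict Int Int), 0 ≤ i → GoodMemo memo →
      sum_odd_loop limit s i memo fuel = sum_odd_loop_alt limit s (fibP i) (fibP (i + 1)) fuel := by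
  induction fuel with
  | zero => intros; rfl
  | succ n ih =>
    intro s i memo hi hm
    rw [sum_odd_loop, sum_odd_loop_alt]
    have hf := fib_memo_spec i memo hm
    simp only [hf.1]
    by_cases hgt : fibP i > limit
    · simp [hgt, not_le.mpr hgt]
    · have hle : fibP i ≤ limit := not_lt.mp hgt
      simp only [hgt, if_false, hle, if_true]
      rw [ih _ (i + 1) _ (by omega) hf.2]
      have : fibP i + fibP (i + 1) = fibP (i + 1 + 1) := by
        rw [show i + 1 + 1 = i + 2 by ring, fibP_rec i hi]; ring
      rw [this]

theorem good_empty : GoodMemo PySem.Dict.empty := by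
  intro k v hk
  simp [PySem.Dict.get?_empty] at hk

theorem fibP_zero : fibP 0 = 0 := by rw [fibP]; norm_num

theorem fibP_one : fibP 1 = 1 := by rw [fibP]; norm_num

-- ===== VERDICT (by name: the statement is the Claim_ definition above) =====
theorem sum_odd_fibonacci_within_limit_spec : Claim_equal_sum_odd_fibonacci_within_limit := by
  intro limit _
  unfold Spec_sum_odd_fibonacci_within_limit
  unfold sum_odd_fibonacci_within_limit sum_odd_fibonacci_within_limit_alt
  rw [loop_eq limit 100 0 0 PySem.Dict.empty le_rfl good_empty]
  rw [fibP_zero, show (0:Int) + 1 = 1 by ring, fibP_one]
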